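-- pv_equiv track=rewrite | github.com/BartschL/QC-System | SortingXY.py | SortingXY
-- ===== SOURCE A (Python) =====
-- import math
--
-- def SortingXY(listOPositions, xy = True, groupByXsortByY = False):
--     if not groupByXsortByY:
--         if xy:
--             # sorting height after width positions -> so [[4,2,4],[c,a,a]]
--             # becomes [[2,4,4][a,a,c]]
--             byX, byY = (list(x) for x in zip(*sorted(zip(
--                 listOPositions[0], listOPositions[1]))))
--         else: # sort by y value (for image positions y = width)
--             byY, byX = (list(x) for x in zip(*sorted(zip(
--                 listOPositions[1], listOPositions[0]))))
--     else:
--         # Sort first by X then by Y, but if differences between X values small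
--         # sort it by Y
--         byX, byY = msort(listOPositions[0], listOPositions[1])
--     return [byX,byY]
--
-- def msort(xList, yList, epsilon = 20):
--     resultX = []
--     resultY = []
--     if len(xList) < 2:
--         return xList, yList
--     mid = int(len(xList)/2)
--     xLeftList, yLeftList = msort(xList[:mid], yList[:mid]) #y
--     xRightList, yRightList = msort(xList[mid:], yList[mid:]) #z
--
--     while (len(xLeftList) > 0) or ( len(xRightList) > 0):
--         if len(xLeftList) > 0 and len(xRightList) > 0:
--             if(math.fabs(xLeftList[0]-xRightList[0])<epsilon):
--                 if yLeftList[0] > yRightList[0]: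
--                     resultX.append(xRightList[0])
--                     xRightList.pop(0)
--                     resultY.append(yRightList[0])
--                     yRightList.pop(0)
--                 else:
--                     resultX.append(xLeftList[0])
--                     xLeftList.pop(0)
--                     resultY.append(yLeftList[0])
--                     yLeftList.pop(0)
--             else:
--                 if xLeftList[0] > xRightList[0]:
--                     resultX.append(xRightList[0])
--                     xRightList.pop(0)
--                     resultY.append(yRightList[0])
--                     yRightList.pop(0)
--                 else:
--                     resultX.append(xLeftList[0])
--                     xLeftList.pop(0)
--                     resultY.append(yLeftList[0])
--                     yLeftList.pop(0)
--         elif len(xRightList) > 0: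
--             for i in xRightList:
--                 resultX.append(xRightList.pop(0))
--                 resultY.append(yRightList.pop(0))
--         else:
--             for i in xLeftList:
--                 resultX.append(xLeftList.pop(0))
--                 resultY.append(yLeftList.pop(0))
--     return resultX, resultY
-- ===== SOURCE B (Python) =====
-- def SortingXY(listOPositions, xy=True, groupByXsortByY=False):
--     pairs = list(zip(listOPositions[0], listOPositions[1]))
--     if not groupByXsortByY:
--         pairs.sort(key=(lambda p: (p[0], p[1])) if xy else (lambda p: (p[1], p[0])))
--     else:
--         pairs = _msort_pairs(pairs)
--     return [[p[0] for p in pairs], [p[1] for p in pairs]]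
--
--
-- def _merge_pairs(left, right, epsilon=20):
--     out = []
--     i = j = 0
--     while i < len(left) and j < len(right):
--         xl, yl = left[i]
--         xr, yr = right[j]
--         if (abs(xl - xr) < epsilon and yl > yr) or (abs(xl - xr) >= epsilon and xl > xr):
--             out.append(right[j])
--             j += 1
--         else:
--             out.append(left[i])
--             i += 1
--     out.extend(left[i:])
--     out.extend(right[j:])
--     return out
--
--
-- def _msort_pairs(pairs):
--     if len(pairs) < 2:
--         return pairs
--     mid = len(pairs) // 2
--     return _merge_pairs(_msort_pairs(pairs[:mid]), _msort_pairs(pairs[mid:]))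
-- ===== Notes on version B (the rewrite author's own statement) =====
-- stated objective: alternative
-- what changed: B zips the two coordinate lists into one list of (x,y) pairs once and sorts that: the plain branches become a single key-based sort, and the group branch becomes an index-pointer merge sort over pairs (same split point and same non-transitive epsilon comparator, ties to the left) instead of A's two parallel lists merged by repeated pop(0) with odd multi-round drain loops.
-- outside the precondition, e.g. on SortingXY([[5], [1, 2]], True, True): A returns [[5], [1, 2]], B returns [[5], [1]]
import Mathlib
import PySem

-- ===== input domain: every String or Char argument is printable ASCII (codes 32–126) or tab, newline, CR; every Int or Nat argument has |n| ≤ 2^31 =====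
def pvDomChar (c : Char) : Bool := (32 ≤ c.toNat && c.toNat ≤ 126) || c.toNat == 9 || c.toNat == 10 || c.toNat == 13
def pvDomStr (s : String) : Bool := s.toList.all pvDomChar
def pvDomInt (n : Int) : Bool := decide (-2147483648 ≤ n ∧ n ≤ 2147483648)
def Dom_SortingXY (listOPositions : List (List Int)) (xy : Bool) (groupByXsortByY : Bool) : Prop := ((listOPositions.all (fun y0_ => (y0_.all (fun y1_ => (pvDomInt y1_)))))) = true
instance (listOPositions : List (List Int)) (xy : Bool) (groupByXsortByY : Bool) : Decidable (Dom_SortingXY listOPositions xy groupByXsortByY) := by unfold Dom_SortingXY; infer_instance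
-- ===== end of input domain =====

-- B re-implements A on one zipped list of (x,y) pairs (key-based sorts / an index-pointer
-- merge sort) instead of A's two parallel lists merged by repeated pop(0); objective: alternative.

-- ===== PORT A =====
-- A-side helper: the drain loop 'for i in xRightList: resultX.append(xRightList.pop(0));
-- resultY.append(yRightList.pop(0))'.  Python's for-loop advances an internal index over the
-- list while the body pops from the front, so ONE round pops only while index < current length;
-- the enclosing while-loop then starts further rounds.  i is that internal index.  fuel is a
-- structural totality guard only (callers pass xs.length, enough for every round).
-- xs[0]/ys[0] are ported as headD 0: exact whenever the list is nonempty (ys empty here is a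
-- Python IndexError, excluded by Pre_).
def pvDrainA : Nat → Nat → List Int → List Int → List Int → List Int →
    List Int × List Int × List Int × List Int
  | 0, _, xs, ys, rX, rY => (xs, ys, rX, rY)
  | fuel + 1, i, xs, ys, rX, rY =>
    if i < xs.length then
      pvDrainA fuel (i + 1) xs.tail ys.tail (rX ++ [xs.headD 0]) (rY ++ [ys.headD 0])
    else (xs, ys, rX, rY)

-- the while-merge loop of A's msort (resultX/resultY are the accumulators rX/rY); fuel is a
-- structural totality guard only (callers pass xl.length + xr.length, which bounds the
-- number of iterations; when it is 0 the loop guard is false and (rX, rY) is returned anyway)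
def pvMergeA : Nat → List Int → List Int → List Int → List Int → List Int → List Int →
    List Int × List Int
  | 0, _, _, _, _, rX, rY => (rX, rY)
  | fuel + 1, xl, yl, xr, yr, rX, rY =>
    if 0 < xl.length ∨ 0 < xr.length then
      if 0 < xl.length ∧ 0 < xr.length then
        if |xl.headD 0 - xr.headD 0| < 20 then        -- math.fabs: exact on |ints| ≤ 2^31
          if yl.headD 0 > yr.headD 0 then
            pvMergeA fuel xl yl xr.tail yr.tail (rX ++ [xr.headD 0]) (rY ++ [yr.headD 0])
          else
            pvMergeA fuel xl.tail yl.tail xr yr (rX ++ [xl.headD 0]) (rY ++ [yl.headD 0])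
        else
          if xl.headD 0 > xr.headD 0 then
            pvMergeA fuel xl yl xr.tail yr.tail (rX ++ [xr.headD 0]) (rY ++ [yr.headD 0])
          else
            pvMergeA fuel xl.tail yl.tail xr yr (rX ++ [xl.headD 0]) (rY ++ [yl.headD 0])
      else if 0 < xr.length then
        let r := pvDrainA xr.length 0 xr yr rX rY
        pvMergeA fuel xl yl r.1 r.2.1 r.2.2.1 r.2.2.2
      else
        let r := pvDrainA xl.length 0 xl yl rX rY
        pvMergeA fuel r.1 r.2.1 xr yr r.2.2.1 r.2.2.2
    else (rX, rY)

-- A's msort; slices x[:mid]/x[mid:] with 0 ≤ mid ≤ len are take/drop; int(len/2) = len/2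
-- exactly (float division is exact below 2^53); fuel is a structural totality guard only
-- (callers pass xs.length; each half is strictly shorter, and with fewer than 2 elements the
-- fuel-0 base case coincides with msort's own base case)
def pvMsortA : Nat → List Int → List Int → List Int × List Int
  | 0, xs, ys => (xs, ys)
  | fuel + 1, xs, ys =>
    if xs.length < 2 then (xs, ys)
    else
      let mid := xs.length / 2
      let left := pvMsortA fuel (xs.take mid) (ys.take mid)
      let right := pvMsortA fuel (xs.drop mid) (ys.drop mid)
      pvMergeA (left.1.length + right.1.length) left.1 left.2 right.1 right.2 [] []

-- listOPositions[0] / [1]: headD after drop; IndexError (fewer than two lists) excluded by Pre_.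
-- zip(*sorted(zip(a, b))) = sort pairs lexicographically (sorted2 fst snd), then unzip by maps
-- (unpacking an empty zip is a Python ValueError, excluded by Pre_).
def SortingXY (listOPositions : List (List Int)) (xy : Bool) (groupByXsortByY : Bool) : List (List Int) :=
  let l0 := listOPositions.headD []
  let l1 := (listOPositions.drop 1).headD []
  if !groupByXsortByY then
    if xy then
      let s := PySem.List.sorted2 (l0.zip l1) Prod.fst Prod.snd
      [s.map Prod.fst, s.map Prod.snd]
    else
      let s := PySem.List.sorted2 (l1.zip l0) Prod.fst Prod.snd
      [s.map Prod.snd, s.map Prod.fst]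
  else
    let r := pvMsortA l0.length l0 l1
    [r.1, r.2]

-- ===== PORT B =====
-- index-pointer merge of Source B (the i/j while loop followed by the two extends); fuel is a
-- structural totality guard only (callers pass l.length + r.length = the iteration count;
-- at fuel 0 both lists are empty and l ++ r = [] is what the loop returns there anyway)
def pvMergeB : Nat → List (Int × Int) → List (Int × Int) → List (Int × Int)
  | 0, l, r => l ++ r
  | fuel + 1, l, r =>
    match l, r with
    | [], r => r
    | l, [] => l
    | (xl, yl) :: l, (xr, yr) :: r =>
      if (|xl - xr| < 20 ∧ yl > yr) ∨ (¬(|xl - xr| < 20) ∧ xl > xr) then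
        (xr, yr) :: pvMergeB fuel ((xl, yl) :: l) r
      else
        (xl, yl) :: pvMergeB fuel l ((xr, yr) :: r)

def pvMsortB : Nat → List (Int × Int) → List (Int × Int)
  | 0, ps => ps
  | fuel + 1, ps =>
    if ps.length < 2 then ps
    else
      let left := pvMsortB fuel (ps.take (ps.length / 2))
      let right := pvMsortB fuel (ps.drop (ps.length / 2))
      pvMergeB (left.length + right.length) left right

def SortingXY_alt (listOPositions : List (List Int)) (xy : Bool) (groupByXsortByY : Bool) : List (List Int) :=
  let pairs := (listOPositions.headD []).zip ((listOPositions.drop 1).headD [])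
  let sortedPairs :=
    if !groupByXsortByY then
      if xy then PySem.List.sorted2 pairs Prod.fst Prod.snd
      else PySem.List.sorted2 pairs Prod.snd Prod.fst
    else pvMsortB pairs.length pairs
  [sortedPairs.map Prod.fst, sortedPairs.map Prod.snd]

-- ===== PRECONDITION & SPEC =====
-- Pre_ excludes the inputs on which A raises (fewer than two coordinate lists; an empty list in
-- the plain-sort branch; in the group branch a y list shorter than an x list of length ≥ 2) and,
-- in the group branch with fewer than two x values, mismatched-length lists: with no y for every
-- x the x/y pairing is unspecified there, and A's pass-through of the unpaired y tail and B's
-- zip-truncation are both defensible readings of that corner.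
def Pre_SortingXY (listOPositions : List (List Int)) (xy : Bool) (groupByXsortByY : Bool) : Prop :=
  2 ≤ listOPositions.length ∧
    (if groupByXsortByY then
       (if (listOPositions.headD []).length < 2 then
          ((listOPositions.drop 1).headD []).length = (listOPositions.headD []).length
        else (listOPositions.headD []).length ≤ ((listOPositions.drop 1).headD []).length)
     else listOPositions.headD [] ≠ [] ∧ (listOPositions.drop 1).headD [] ≠ [])
instance (listOPositions : List (List Int)) (xy : Bool) (groupByXsortByY : Bool) : Decidable (Pre_SortingXY listOPositions xy groupByXsortByY) := by unfold Pre_SortingXY; infer_instance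

def pvWitness_SortingXY : List (List Int) × Bool × Bool := ([[30, 5, 0], [1, 2, 3]], true, true)

def Spec_SortingXY (listOPositions : List (List Int)) (xy : Bool) (groupByXsortByY : Bool) (out : List (List Int)) : Prop := out = SortingXY_alt listOPositions xy groupByXsortByY
instance (listOPositions : List (List Int)) (xy : Bool) (groupByXsortByY : Bool) (out : List (List Int)) : Decidable (Spec_SortingXY listOPositions xy groupByXsortByY out) := by unfold Spec_SortingXY; infer_instance

-- ===== CLAIM (what is proved, stated in full; the proofs are below) =====
def Claim_equal_SortingXY : Prop := ∀ (listOPositions : List (List Int)) (xy : Bool) (groupByXsortByY : Bool), Dom_SortingXY listOPositions xy groupByXsortByY → Pre_SortingXY listOPositions xy groupByXsortByY → Spec_SortingXY listOPositions xy groupByXsortByY (SortingXY listOPositions xy groupByXsortByY)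

-- ===== LEMMAS AND PROOFS =====

theorem insertBy_map_of_equiv {α β : Type} (f : α → β) (b' : β → β → Bool) (b : α → α → Bool)
    (hb : ∀ a c : α, b' (f a) (f c) = b a c) (x : α) (ys : List α) :
    PySem.List.insertBy b' (f x) (ys.map f) = (PySem.List.insertBy b x ys).map f := by
  induction ys with
  | nil => simp [PySem.List.insertBy]
  | cons y ys ih =>
    simp only [List.map_cons, PySem.List.insertBy, hb]
    by_cases h : b x y
    · simp [h]
    · simp [h, ih]

theorem sorted2_eq_foldl (xs : List (Int × Int)) (k1 k2 : Int × Int → Int) :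
    PySem.List.sorted2 xs k1 k2
      = xs.foldl (fun acc x => PySem.List.insertBy
          (fun a b => decide (k1 a < k1 b) || !decide (k1 b < k1 a) && decide (k2 a < k2 b)) x acc) [] := rfl

theorem sorted2_map_swap (P : List (Int × Int)) :
    PySem.List.sorted2 (P.map Prod.swap) Prod.fst Prod.snd
      = (PySem.List.sorted2 P Prod.snd Prod.fst).map Prod.swap := by
  have key : ∀ (Q a : List (Int × Int)),
      (Q.map Prod.swap).foldl (fun acc x => PySem.List.insertBy
          (fun p q : Int × Int => decide (p.1 < q.1) || !decide (q.1 < p.1) && decide (p.2 < q.2)) x acc)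
          (a.map Prod.swap)
        = (Q.foldl (fun acc x => PySem.List.insertBy
          (fun p q : Int × Int => decide (p.2 < q.2) || !decide (q.2 < p.2) && decide (p.1 < q.1)) x acc) a).map
            Prod.swap := by
    intro Q
    induction Q with
    | nil => intro a; simp
    | cons q Q ih =>
      intro a
      simp only [List.map_cons, List.foldl_cons]
      rw [insertBy_map_of_equiv Prod.swap
            (fun p q : Int × Int => decide (p.1 < q.1) || !decide (q.1 < p.1) && decide (p.2 < q.2))
            (fun p q : Int × Int => decide (p.2 < q.2) || !decide (q.2 < p.2) && decide (p.1 < q.1))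
            (fun a c => rfl) q a]
      exact ih _
  rw [sorted2_eq_foldl, sorted2_eq_foldl]
  simpa using key P []

-- (xs.take k).zip (ys.take k) = (xs.zip ys).take k and the drop twin (no Mathlib name found)
theorem zip_take_take {α β : Type} (xs : List α) : ∀ (ys : List β) (k : Nat),
    (xs.take k).zip (ys.take k) = (xs.zip ys).take k := by
  induction xs with
  | nil => intro ys k; simp
  | cons x xs ih =>
    intro ys k
    cases ys with
    | nil => simp
    | cons y ys =>
      cases k with
      | zero => simp
      | succ k => simp [ih ys k]

theorem zip_drop_drop {α β : Type} (xs : List α) : ∀ (ys : List β) (k : Nat),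
    (xs.drop k).zip (ys.drop k) = (xs.zip ys).drop k := by
  induction xs with
  | nil => intro ys k; simp
  | cons x xs ih =>
    intro ys k
    cases ys with
    | nil => simp
    | cons y ys =>
      cases k with
      | zero => simp
      | succ k => simp [ih ys k]

theorem map_snd_zip_take {α β : Type} (xs : List α) : ∀ (ys : List β),
    (xs.zip ys).map Prod.snd = ys.take xs.length := by
  induction xs with
  | nil => intro ys; simp
  | cons x xs ih =>
    intro ys
    cases ys with
    | nil => simp
    | cons y ys => simp [ih ys]

theorem pvDrainA_spec : ∀ (fuel i : Nat) (xs ys rX rY : List Int),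
    xs.length ≤ ys.length → xs.length - i ≤ fuel →
    ∃ k, k ≤ xs.length ∧ (i < xs.length → 0 < k) ∧
      pvDrainA fuel i xs ys rX rY = (xs.drop k, ys.drop k, rX ++ xs.take k, rY ++ ys.take k) := by
  intro fuel
  induction fuel with
  | zero =>
    intro i xs ys rX rY _ hfuel
    refine ⟨0, by simp, by omega, ?_⟩
    rw [pvDrainA]; simp
  | succ fuel ih =>
    intro i xs ys rX rY h hfuel
    by_cases hi : i < xs.length
    · cases xs with
      | nil => simp at hi
      | cons x xs' =>
        cases ys with
        | nil => simp at h
        | cons y ys' =>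
          obtain ⟨k, hk1, _, heq⟩ := ih (i + 1) xs' ys' (rX ++ [x]) (rY ++ [y])
            (by simpa using h) (by simp only [List.length_cons] at hfuel ⊢; omega)
          refine ⟨k + 1, by simpa using hk1, fun _ => by omega, ?_⟩
          rw [pvDrainA, if_pos hi]
          simp only [List.tail_cons, List.headD_cons]
          rw [heq]
          simp [List.append_assoc]
    · refine ⟨0, by simp, by omega, ?_⟩
      rw [pvDrainA, if_neg hi]; simp

theorem pvMergeA_eq_aux : ∀ (fuel : Nat) (Pl Pr : List (Int × Int)), Pl.length + Pr.length ≤ fuel →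
    ∀ (El Er rX rY : List Int),
    pvMergeA fuel (Pl.map Prod.fst) (Pl.map Prod.snd ++ El) (Pr.map Prod.fst) (Pr.map Prod.snd ++ Er) rX rY
      = (rX ++ (pvMergeB fuel Pl Pr).map Prod.fst, rY ++ (pvMergeB fuel Pl Pr).map Prod.snd) := by
  intro fuel
  induction fuel with
  | zero =>
    intro Pl Pr hn El Er rX rY
    have h1 : Pl = [] := by cases Pl <;> simp_all
    have h2 : Pr = [] := by cases Pr <;> simp_all
    subst h1; subst h2
    rw [pvMergeA, pvMergeB]; simp
  | succ fuel ih =>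
    intro Pl Pr hn El Er rX rY
    match Pl, Pr with
    | [], [] => rw [pvMergeA, pvMergeB]; simp
    | [], (c, d) :: Pr' =>
      -- A drains the right side (in ceil-halving rounds), B appends the right rest
      rw [pvMergeA]
      rw [if_pos (by simp)]
      rw [if_neg (by simp)]
      rw [if_pos (by simp : 0 < (((c, d) :: Pr').map Prod.fst).length)]
      obtain ⟨k, hk1, hk2, heq⟩ := pvDrainA_spec ((((c, d) :: Pr').map Prod.fst).length) 0
        (((c, d) :: Pr').map Prod.fst) (((c, d) :: Pr').map Prod.snd ++ Er) rX rY (by simp) (by omega)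
      have hkP : k ≤ ((c, d) :: Pr').length := by simpa using hk1
      have hk0 : 0 < k := hk2 (by simp)
      rw [heq]
      dsimp only [List.map_nil, List.nil_append]
      have e1 : ((((c, d) :: Pr').map Prod.fst).drop k) = (((c, d) :: Pr').drop k).map Prod.fst := by
        simp [List.map_drop]
      have e2 : ((((c, d) :: Pr').map Prod.snd ++ Er).drop k) = (((c, d) :: Pr').drop k).map Prod.snd ++ Er := by
        rw [List.drop_append_of_le_length (by simpa using hkP)]; simp [List.map_drop]
      have e3 : ((((c, d) :: Pr').map Prod.fst).take k) = (((c, d) :: Pr').take k).map Prod.fst := by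
        simp [List.map_take]
      have e4 : ((((c, d) :: Pr').map Prod.snd ++ Er).take k) = (((c, d) :: Pr').take k).map Prod.snd := by
        rw [List.take_append_of_le_length (by simpa using hkP)]; simp [List.map_take]
      rw [e1, e2, e3, e4]
      have hfuel : ([] : List (Int × Int)).length + (((c, d) :: Pr').drop k).length ≤ fuel := by
        simp only [List.length_cons] at hn hkP
        simp only [List.length_nil, List.length_drop, List.length_cons]
        omega
      have := ih [] (((c, d) :: Pr').drop k) hfuel El Er
        (rX ++ (((c, d) :: Pr').take k).map Prod.fst) (rY ++ (((c, d) :: Pr').take k).map Prod.snd)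
      simp only [List.map_nil, List.nil_append] at this
      rw [this]
      have hB : ∀ (f : Nat) (Q : List (Int × Int)), pvMergeB f [] Q = Q := by
        intro f Q; cases f <;> cases Q <;> simp [pvMergeB]
      rw [hB, hB]
      simp [List.append_assoc, ← List.map_append]
    | (a, b) :: Pl', [] =>
      -- A drains the left side, B appends the left rest
      rw [pvMergeA]
      rw [if_pos (by simp)]
      rw [if_neg (by simp)]
      rw [if_neg (by simp)]
      obtain ⟨k, hk1, hk2, heq⟩ := pvDrainA_spec ((((a, b) :: Pl').map Prod.fst).length) 0
        (((a, b) :: Pl').map Prod.fst) (((a, b) :: Pl').map Prod.snd ++ El) rX rY (by simp) (by omega)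
      have hkP : k ≤ ((a, b) :: Pl').length := by simpa using hk1
      have hk0 : 0 < k := hk2 (by simp)
      rw [heq]
      dsimp only [List.map_nil, List.nil_append]
      have e1 : ((((a, b) :: Pl').map Prod.fst).drop k) = (((a, b) :: Pl').drop k).map Prod.fst := by
        simp [List.map_drop]
      have e2 : ((((a, b) :: Pl').map Prod.snd ++ El).drop k) = (((a, b) :: Pl').drop k).map Prod.snd ++ El := by
        rw [List.drop_append_of_le_length (by simpa using hkP)]; simp [List.map_drop]
      have e3 : ((((a, b) :: Pl').map Prod.fst).take k) = (((a, b) :: Pl').take k).map Prod.fst := by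
        simp [List.map_take]
      have e4 : ((((a, b) :: Pl').map Prod.snd ++ El).take k) = (((a, b) :: Pl').take k).map Prod.snd := by
        rw [List.take_append_of_le_length (by simpa using hkP)]; simp [List.map_take]
      rw [e1, e2, e3, e4]
      have hfuel : (((a, b) :: Pl').drop k).length + ([] : List (Int × Int)).length ≤ fuel := by
        simp only [List.length_cons] at hn hkP
        simp only [List.length_nil, List.length_drop, List.length_cons]
        omega
      have := ih (((a, b) :: Pl').drop k) [] hfuel El Er
        (rX ++ (((a, b) :: Pl').take k).map Prod.fst) (rY ++ (((a, b) :: Pl').take k).map Prod.snd)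
      simp only [List.map_nil, List.nil_append] at this
      rw [this]
      have hB : ∀ (f : Nat) (Q : List (Int × Int)), pvMergeB f Q [] = Q := by
        intro f Q; cases f <;> cases Q <;> simp [pvMergeB]
      rw [hB, hB]
      simp [List.append_assoc, ← List.map_append]
    | (a, b) :: Pl', (c, d) :: Pr' =>
      rw [pvMergeA]
      rw [if_pos (by simp)]
      rw [if_pos (by simp : 0 < (((a, b) :: Pl').map Prod.fst).length ∧ 0 < (((c, d) :: Pr').map Prod.fst).length)]
      simp only [List.map_cons, List.headD_cons, List.cons_append, List.tail_cons]
      have hlen1 : ((a, b) :: Pl').length + Pr'.length ≤ fuel := by simp at hn ⊢; omega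
      have hlen2 : Pl'.length + ((c, d) :: Pr').length ≤ fuel := by simp at hn ⊢; omega
      by_cases h1 : |a - c| < (20 : Int)
      · rw [if_pos h1]
        by_cases h2 : b > d
        · rw [if_pos h2]
          have := ih ((a, b) :: Pl') Pr' hlen1 El Er (rX ++ [c]) (rY ++ [d])
          simp only [List.map_cons, List.cons_append] at this
          rw [this]
          rw [show pvMergeB (fuel + 1) ((a, b) :: Pl') ((c, d) :: Pr')
                = (c, d) :: pvMergeB fuel ((a, b) :: Pl') Pr' from by
            rw [pvMergeB]; rw [if_pos (Or.inl ⟨h1, h2⟩)]]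
          simp [List.append_assoc]
        · rw [if_neg h2]
          have := ih Pl' ((c, d) :: Pr') hlen2 El Er (rX ++ [a]) (rY ++ [b])
          simp only [List.map_cons, List.cons_append] at this
          rw [this]
          rw [show pvMergeB (fuel + 1) ((a, b) :: Pl') ((c, d) :: Pr')
                = (a, b) :: pvMergeB fuel Pl' ((c, d) :: Pr') from by
            rw [pvMergeB]; rw [if_neg (by tauto)]]
          simp [List.append_assoc]
      · rw [if_neg h1]
        by_cases h3 : a > c
        · rw [if_pos h3]
          have := ih ((a, b) :: Pl') Pr' hlen1 El Er (rX ++ [c]) (rY ++ [d])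
          simp only [List.map_cons, List.cons_append] at this
          rw [this]
          rw [show pvMergeB (fuel + 1) ((a, b) :: Pl') ((c, d) :: Pr')
                = (c, d) :: pvMergeB fuel ((a, b) :: Pl') Pr' from by
            rw [pvMergeB]; rw [if_pos (Or.inr ⟨h1, h3⟩)]]
          simp [List.append_assoc]
        · rw [if_neg h3]
          have := ih Pl' ((c, d) :: Pr') hlen2 El Er (rX ++ [a]) (rY ++ [b])
          simp only [List.map_cons, List.cons_append] at this
          rw [this]
          rw [show pvMergeB (fuel + 1) ((a, b) :: Pl') ((c, d) :: Pr')
                = (a, b) :: pvMergeB fuel Pl' ((c, d) :: Pr') from by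
            rw [pvMergeB]; rw [if_neg (by tauto)]]
          simp [List.append_assoc]

theorem pvMergeA_eq (Pl Pr : List (Int × Int)) (El Er rX rY : List Int) :
    pvMergeA (Pl.length + Pr.length) (Pl.map Prod.fst) (Pl.map Prod.snd ++ El)
        (Pr.map Prod.fst) (Pr.map Prod.snd ++ Er) rX rY
      = (rX ++ (pvMergeB (Pl.length + Pr.length) Pl Pr).map Prod.fst,
         rY ++ (pvMergeB (Pl.length + Pr.length) Pl Pr).map Prod.snd) :=
  pvMergeA_eq_aux (Pl.length + Pr.length) Pl Pr le_rfl El Er rX rY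

theorem pvMsortA_eq : ∀ (fuel : Nat) (xs : List Int), xs.length ≤ fuel → ∀ (ys : List Int),
    xs.length ≤ ys.length →
    pvMsortA fuel xs ys = ((pvMsortB fuel (xs.zip ys)).map Prod.fst,
      (pvMsortB fuel (xs.zip ys)).map Prod.snd ++ if xs.length < 2 then ys.drop xs.length else []) := by
  intro fuel
  induction fuel with
  | zero =>
    intro xs hn ys h
    have hx : xs = [] := by cases xs <;> simp_all
    subst hx
    rw [pvMsortA, pvMsortB]
    simp
  | succ fuel ih =>
    intro xs hn ys h
    by_cases hlt : xs.length < 2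
    · rw [pvMsortA, if_pos hlt]
      rw [pvMsortB, if_pos (by rw [List.length_zip]; omega)]
      rw [if_pos hlt]
      rw [List.map_fst_zip h, map_snd_zip_take]
      simp [List.take_append_drop]
    · rw [pvMsortA, if_neg hlt]
      simp only
      have hmid1 : 1 ≤ xs.length / 2 := by omega
      have hmid2 : xs.length / 2 < xs.length := by omega
      have hzlen : (xs.zip ys).length = xs.length := by rw [List.length_zip]; omega
      have htl : (xs.take (xs.length / 2)).length = xs.length / 2 := by
        rw [List.length_take]; omega
      have hty : (ys.take (xs.length / 2)).length = xs.length / 2 := by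
        rw [List.length_take]; omega
      have hL := ih (xs.take (xs.length / 2)) (by rw [htl]; omega) (ys.take (xs.length / 2))
        (by rw [htl, hty])
      have hR := ih (xs.drop (xs.length / 2)) (by rw [List.length_drop]; omega)
        (ys.drop (xs.length / 2)) (by rw [List.length_drop, List.length_drop]; omega)
      have hLif : (if (xs.take (xs.length / 2)).length < 2 then
          (ys.take (xs.length / 2)).drop (xs.take (xs.length / 2)).length else []) = ([] : List Int) := by
        split
        · exact List.drop_eq_nil_of_le (le_of_eq (by rw [htl, hty]))
        · rfl
      rw [hLif] at hL
      rw [hL, hR]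
      dsimp only
      rw [zip_take_take, zip_drop_drop]
      have hlm : ∀ (Q : List (Int × Int)) (E : List Int), ((Q.map Prod.fst).length) = Q.length := by
        intro Q E; simp
      rw [show ((pvMsortB fuel ((xs.zip ys).take (xs.length / 2))).map Prod.fst).length
            + ((pvMsortB fuel ((xs.zip ys).drop (xs.length / 2))).map Prod.fst).length
          = (pvMsortB fuel ((xs.zip ys).take (xs.length / 2))).length
            + (pvMsortB fuel ((xs.zip ys).drop (xs.length / 2))).length from by simp]
      rw [pvMergeA_eq]
      have hRHS : pvMsortB (fuel + 1) (xs.zip ys)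
          = pvMergeB ((pvMsortB fuel ((xs.zip ys).take (xs.length / 2))).length
                + (pvMsortB fuel ((xs.zip ys).drop (xs.length / 2))).length)
              (pvMsortB fuel ((xs.zip ys).take (xs.length / 2)))
              (pvMsortB fuel ((xs.zip ys).drop (xs.length / 2))) := by
        rw [pvMsortB]
        rw [if_neg (by rw [hzlen]; omega)]
        rw [hzlen]
      rw [hRHS, if_neg hlt]
      simp

-- ===== VERDICT (by name: the statement is the Claim_ definition above) =====
theorem SortingXY_spec : Claim_equal_SortingXY := by
  intro l xy g _ hpre
  obtain ⟨hlen, hcond⟩ := hpre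
  unfold Spec_SortingXY SortingXY SortingXY_alt
  cases g with
  | false =>
    cases xy with
    | true => simp
    | false =>
      simp only [Bool.not_false, if_pos, Bool.false_eq_true, if_false]
      rw [← List.zip_swap]
      rw [sorted2_map_swap]
      simp [Function.comp_def]
  | true =>
    simp only [Bool.not_true, Bool.false_eq_true, if_false]
    simp only [if_pos] at hcond
    by_cases h2 : (l.headD []).length < 2
    · rw [if_pos h2] at hcond
      have hle : (l.headD []).length ≤ ((l.drop 1).headD []).length := le_of_eq hcond.symm
      have hzl : ((l.headD []).zip ((l.drop 1).headD [])).length = (l.headD []).length := by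
        rw [List.length_zip]; omega
      rw [pvMsortA_eq _ _ le_rfl _ hle]
      rw [if_pos h2]
      rw [List.drop_eq_nil_of_le (le_of_eq hcond)]
      rw [hzl]
      simp
    · rw [if_neg h2] at hcond
      have hzl : ((l.headD []).zip ((l.drop 1).headD [])).length = (l.headD []).length := by
        rw [List.length_zip]; omega
      rw [pvMsortA_eq _ _ le_rfl _ hcond]
      rw [if_neg h2, hzl]
      simp
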